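-- pv_equiv track=rewrite | github.com/stormtrooper1859/ml-course | codeforces/taskN.py | class_dist
-- ===== SOURCE A (Python) =====
-- def dist(v):
--     a = sorted(v)
--     n = len(v)
--     res = 0
--     for i in range(n - 1):
--         res += (a[i + 1] - a[i]) * (i + 1) * (n - i - 1)
--     return res
--
-- def class_dist(X, Y):
--     mp = dict()
--
--     for i in range(len(Y)):
--         if mp.get(Y[i]) is None:
--             mp[Y[i]] = []
--         mp[Y[i]].append(X[i])
--
--     res_in = 0
--     res_out = dist(X)
--
--     for k, v in mp.items():
--         res_in += dist(v)
--
--     return res_in * 2, (res_out - res_in) * 2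
-- ===== SOURCE B (Python) =====
-- def dist(a):
--     n = len(a)
--     total = 0
--     for i in range(n):
--         for j in range(i + 1, n):
--             total += abs(a[i] - a[j])
--     return total
--
--
-- def class_dist(X, Y):
--     groups = {}
--     for i, y in enumerate(Y):
--         groups.setdefault(y, []).append(X[i])
--     res_in = sum(dist(g) for g in groups.values())
--     res_out = dist(X)
--     return res_in * 2, (res_out - res_in) * 2
-- ===== Notes on version B (the rewrite author's own statement) =====
-- stated objective: alternative
-- what changed: dist no longer sorts and telescopes adjacent gaps: B sums |a_i-a_j| directly over all i<j with a nested loop, and class_dist groups by label with enumerate/setdefault and sums the group distances.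
import Mathlib
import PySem

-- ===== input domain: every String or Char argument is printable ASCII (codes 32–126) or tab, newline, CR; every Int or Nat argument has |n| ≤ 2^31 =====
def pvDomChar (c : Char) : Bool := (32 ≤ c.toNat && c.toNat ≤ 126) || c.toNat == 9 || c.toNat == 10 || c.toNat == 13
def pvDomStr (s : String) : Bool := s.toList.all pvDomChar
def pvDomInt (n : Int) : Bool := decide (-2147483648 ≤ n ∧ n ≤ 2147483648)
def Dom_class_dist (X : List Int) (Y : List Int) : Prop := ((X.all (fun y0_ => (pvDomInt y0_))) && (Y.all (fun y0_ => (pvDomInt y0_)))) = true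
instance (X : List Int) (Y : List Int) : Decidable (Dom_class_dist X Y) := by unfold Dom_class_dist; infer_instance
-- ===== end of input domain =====

-- B replaces dist's sort-and-telescope formula by a direct nested i<j loop summing |a_i-a_j| and
-- groups by label with enumerate/setdefault (objective: alternative, not faster).

-- ===== PORT A =====
def pvDistA (v : List Int) : Int :=
  (PySem.List.pyRange 0 ((v.length : Int) - 1) 1).foldl
    (fun res i =>
      res + (PySem.List.pyGetD (PySem.List.sorted v (fun x => x) false) (i + 1) 0
             - PySem.List.pyGetD (PySem.List.sorted v (fun x => x) false) i 0)
            * (i + 1) * ((v.length : Int) - i - 1)) 0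

def class_dist (X : List Int) (Y : List Int) : Int × Int :=
  let mp : PySem.Dict Int (List Int) :=
    (PySem.List.pyRange 0 ((Y.length : Int)) 1).foldl
      (fun mp i =>
        (if mp.get? (PySem.List.pyGetD Y i 0) = none
         then mp.insert (PySem.List.pyGetD Y i 0) []
         else mp).modify (PySem.List.pyGetD Y i 0) [] (fun l => l ++ [PySem.List.pyGetD X i 0]))
      PySem.Dict.empty
  let res_out := pvDistA X
  let res_in := mp.items.foldl (fun acc kv => acc + pvDistA kv.2) 0
  (res_in * 2, (res_out - res_in) * 2)

-- ===== PORT B =====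
def pvDistB (a : List Int) : Int :=
  (PySem.List.pyRange 0 ((a.length : Int)) 1).foldl
    (fun total i =>
      (PySem.List.pyRange (i + 1) ((a.length : Int)) 1).foldl
        (fun t j => t + |PySem.List.pyGetD a i 0 - PySem.List.pyGetD a j 0|) total) 0

def class_dist_alt (X : List Int) (Y : List Int) : Int × Int :=
  let groups : PySem.Dict Int (List Int) :=
    (PySem.List.enumerate Y 0).foldl
      (fun d p => d.modify p.2 [] (fun l => l ++ [PySem.List.pyGetD X p.1 0]))
      PySem.Dict.empty
  let res_in := (groups.values.map pvDistB).sum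
  let res_out := pvDistB X
  (res_in * 2, (res_out - res_in) * 2)

-- ===== PRECONDITION & SPEC =====
-- A (and B) index X[i] for every i < len(Y); both raise IndexError iff len(Y) > len(X).
def Pre_class_dist (X : List Int) (Y : List Int) : Prop := Y.length ≤ X.length
instance (X : List Int) (Y : List Int) : Decidable (Pre_class_dist X Y) := by unfold Pre_class_dist; infer_instance
def pvWitness_class_dist : List Int × List Int := ([1, 5, 2, 4], [0, 1, 0, 1])

def Spec_class_dist (X : List Int) (Y : List Int) (out : Int × Int) : Prop := out = class_dist_alt X Y
instance (X : List Int) (Y : List Int) (out : Int × Int) : Decidable (Spec_class_dist X Y out) := by unfold Spec_class_dist; infer_instance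

-- ===== CLAIM (what is proved, stated in full; the proofs are below) =====
def Claim_equal_class_dist : Prop := ∀ (X : List Int) (Y : List Int), Dom_class_dist X Y → Pre_class_dist X Y → Spec_class_dist X Y (class_dist X Y)

-- ===== LEMMAS AND PROOFS =====

-- pairwise sum, structurally: pvPair (x :: rest) = sum_y |x - y| + pvPair rest
def pvPair : List Int → Int
  | [] => 0
  | x :: rest => ((rest.map (fun y => |x - y|)).sum) + pvPair rest

-- the inner j-loop of pvDistB sums |x - a[j]| over the suffix
lemma pvInner (a : List Int) (x : Int) (s : Nat) (t0 : Int) :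
    (PySem.List.pyRange ((s : Nat) : Int) ((a.length : Int)) 1).foldl
      (fun t j => t + |x - PySem.List.pyGetD a j 0|) t0
    = t0 + ((a.drop s).map (fun y => |x - y|)).sum := by
  rw [PySem.List.foldl_pyRange_pyGetD' (a := ((s : Nat) : Int)) (xs := a) (d := 0)
        (f := fun t y => t + |x - y|) (init := t0) (by positivity)]
  rw [PySem.List.foldl_add _ (fun y => |x - y|) t0]
  simp only [Int.toNat_natCast]

-- the outer i-loop of pvDistB from position s computes pvPair of the dropped suffix
lemma pvOuter (a : List Int) : ∀ (d s : Nat) (acc : Int), a.length - s = d →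
    (PySem.List.pyRange ((s : Nat) : Int) ((a.length : Int)) 1).foldl
      (fun total i =>
        (PySem.List.pyRange (i + 1) ((a.length : Int)) 1).foldl
          (fun t j => t + |PySem.List.pyGetD a i 0 - PySem.List.pyGetD a j 0|) total) acc
    = acc + pvPair (a.drop s) := by
  intro d
  induction d with
  | zero =>
      intro s acc hd
      rw [PySem.List.pyRange_one_eq_nil (by omega),
          List.drop_eq_nil_of_le (by omega)]
      simp [pvPair]
  | succ d ih =>
      intro s acc hd
      have hs : s < a.length := by omega
      rw [PySem.List.pyRange_one_cons (by exact_mod_cast hs)]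
      simp only [List.foldl_cons]
      rw [show ((s : Nat) : Int) + 1 = (((s + 1 : Nat)) : Int) by push_cast; ring]
      rw [pvInner a (PySem.List.pyGetD a ((s : Nat) : Int) 0) (s + 1) acc]
      rw [ih (s + 1) _ (by omega)]
      rw [List.drop_eq_getElem_cons hs]
      simp only [pvPair]
      rw [PySem.List.pyGetD_eq_getElem a (i := ((s : Nat) : Int)) 0 (by positivity)
            (by exact_mod_cast hs)]
      simp only [Int.toNat_natCast]
      ring

lemma pvDistB_eq_pair (a : List Int) : pvDistB a = pvPair a := by
  unfold pvDistB
  have h := pvOuter a a.length 0 0 (by omega)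
  simpa using h

-- weighted sum: pvWsum c [x0,x1,...] = x0*c + x1*(c+2) + x2*(c+4) + ...
def pvWsum : Int → List Int → Int
  | _, [] => 0
  | c, x :: xs => x * c + pvWsum (c + 2) xs

-- state of A's telescoping loop: previous element, current 1-based position k, fixed n
def pvTele : Int → Int → Int → List Int → Int
  | _, _, _, [] => 0
  | prev, k, n, y :: ys => (y - prev) * k * (n - k) + pvTele y (k + 1) n ys

lemma pvWsum_succ (l : List Int) : ∀ c : Int, pvWsum (c + 1) l = l.sum + pvWsum c l := by
  induction l with
  | nil => intro c; simp [pvWsum]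
  | cons x xs ih =>
      intro c
      simp only [pvWsum, List.sum_cons]
      rw [show c + 1 + 2 = (c + 2) + 1 by ring, ih (c + 2)]
      ring

lemma pvTele_eq_wsum (l : List Int) : ∀ (prev k n : Int), n = k + l.length →
    pvTele prev k n l = -(prev * k * l.length) + pvWsum (k - l.length + 1) l := by
  induction l with
  | nil => intro prev k n _; simp [pvTele, pvWsum]
  | cons y ys ih =>
      intro prev k n hn
      have hn' : n = (k + 1) + ys.length := by
        simp only [List.length_cons] at hn; push_cast at hn ⊢; omega
      simp only [pvTele, pvWsum, List.length_cons]
      rw [ih y (k + 1) n hn', hn']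
      push_cast
      ring_nf

-- A's index loop from position s equals pvTele on the dropped suffix
lemma pvFold_eq_tele (a : List Int) (n : Int) (hn : n = (a.length : Int)) :
    ∀ (d s : Nat) (acc : Int), a.length - 1 - s = d → s < a.length →
    (PySem.List.pyRange (s : Int) (n - 1) 1).foldl
      (fun res i =>
        res + (PySem.List.pyGetD a (i + 1) 0 - PySem.List.pyGetD a i 0) * (i + 1) * (n - i - 1)) acc
      = acc + pvTele (a.getD s 0) ((s : Int) + 1) n (a.drop (s + 1)) := by
  intro d
  induction d with
  | zero =>
      intro s acc hd hs
      have hs' : s = a.length - 1 := by omega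
      have hrange : PySem.List.pyRange (s : Int) (n - 1) 1 = [] := by
        apply PySem.List.pyRange_one_eq_nil; rw [hn]; omega
      have hdrop : a.drop (s + 1) = [] := by
        apply List.drop_eq_nil_of_le; omega
      rw [hrange, hdrop]; simp [pvTele]
  | succ d ih =>
      intro s acc hd hs
      have hlt : (s : Int) < n - 1 := by rw [hn]; omega
      have hs1 : s + 1 < a.length := by omega
      rw [PySem.List.pyRange_one_cons hlt]
      simp only [List.foldl_cons]
      rw [show (s : Int) + 1 = ((s + 1 : Nat) : Int) by push_cast; ring]
      rw [ih (s + 1) _ (by omega) hs1]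
      rw [List.drop_eq_getElem_cons hs1]
      simp only [pvTele]
      rw [PySem.List.pyGetD_eq_getElem a (i := ((s + 1 : Nat) : Int)) 0 (by positivity) (by exact_mod_cast hs1),
          PySem.List.pyGetD_eq_getElem a (i := ((s : Nat) : Int)) 0 (by positivity) (by exact_mod_cast hs)]
      have h1 : ((s + 1 : Nat) : Int).toNat = s + 1 := by omega
      have h2 : ((s : Nat) : Int).toNat = s := by omega
      simp only [h1, h2]
      rw [List.getD_eq_getElem a 0 hs, List.getD_eq_getElem a 0 hs1]
      push_cast
      ring_nf

lemma pvDistA_eq_wsum (v : List Int) :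
    pvDistA v = pvWsum (1 - v.length) (PySem.List.sorted v (fun x => x) false) := by
  have hlen : (PySem.List.sorted v (fun x => x) false).length = v.length :=
    (PySem.List.sorted_perm v (fun x => x) false).length_eq
  unfold pvDistA
  cases ha : PySem.List.sorted v (fun x => x) false with
  | nil =>
      have h0 : v.length = 0 := by rw [← hlen, ha]; rfl
      rw [h0]
      rw [PySem.List.pyRange_one_eq_nil (by simp)]
      simp [pvWsum]
  | cons x xs =>
      have hpos : 0 < v.length := by rw [← hlen, ha]; simp
      rw [ha] at hlen
      have ht := pvFold_eq_tele (x :: xs) ((v.length : Int)) (by exact_mod_cast hlen.symm)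
        xs.length 0 0 (by simp) (by simp)
      simp only [Nat.cast_zero] at ht
      rw [ht]
      simp only [List.getD_cons_zero, List.drop_succ_cons, List.drop_zero, zero_add]
      rw [pvTele_eq_wsum xs x 1 (v.length : Int) (by rw [← hlen]; push_cast [List.length_cons]; ring)]
      simp only [pvWsum]
      have hm : (v.length : Int) = (xs.length : Int) + 1 := by
        rw [← hlen]; push_cast [List.length_cons]; ring
      rw [hm,
        show (1 : Int) - ((xs.length : Int) + 1) + 2 = (1 - (xs.length : Int)) + 1 by ring,
        pvWsum_succ]
      ring

-- doubled pairwise sum is the full double sum (diagonal is zero)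
lemma pvPair_double (l : List Int) :
    2 * pvPair l = (l.map (fun x => (l.map (fun y => |x - y|)).sum)).sum := by
  induction l with
  | nil => simp [pvPair]
  | cons x xs ih =>
      simp only [pvPair]
      have hswap : (xs.map (fun z => |z - x|)).sum = (xs.map (fun y => |x - y|)).sum := by
        congr 1; exact List.map_congr_left (fun z _ => abs_sub_comm z x)
      calc 2 * ((xs.map (fun y => |x - y|)).sum + pvPair xs)
          = (xs.map (fun y => |x - y|)).sum + ((xs.map (fun z => |z - x|)).sum + 2 * pvPair xs) := by
            rw [hswap]; ring
        _ = (xs.map (fun y => |x - y|)).sum +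
              (xs.map (fun z => |z - x| + (xs.map (fun y => |z - y|)).sum)).sum := by
            rw [PySem.List.sum_map_add_int, ih]
        _ = |x - x| + (xs.map (fun y => |x - y|)).sum +
              (xs.map (fun z => |z - x| + (xs.map (fun y => |z - y|)).sum)).sum := by
            simp
        _ = _ := by simp only [List.map_cons, List.sum_cons]

lemma pvPair_perm {l l' : List Int} (h : l.Perm l') : pvPair l = pvPair l' := by
  have hinner : ∀ z : Int, (l.map (fun y => |z - y|)).sum = (l'.map (fun y => |z - y|)).sum :=
    fun z => (h.map (fun y => |z - y|)).sum_eq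
  have hdouble : (l.map (fun x => (l.map (fun y => |x - y|)).sum)).sum
      = (l'.map (fun x => (l'.map (fun y => |x - y|)).sum)).sum := by
    calc (l.map (fun x => (l.map (fun y => |x - y|)).sum)).sum
        = (l.map (fun x => (l'.map (fun y => |x - y|)).sum)).sum := by
          congr 1; exact List.map_congr_left (fun x _ => hinner x)
      _ = _ := (h.map _).sum_eq
  have := pvPair_double l
  rw [hdouble, ← pvPair_double l'] at this
  omega

lemma pvPair_sorted_eq_wsum (l : List Int) (h : l.Pairwise (· ≤ ·)) :
    pvPair l = pvWsum (1 - l.length) l := by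
  induction l with
  | nil => simp [pvPair, pvWsum]
  | cons x xs ih =>
      rw [List.pairwise_cons] at h
      have hS : (xs.map (fun y => |x - y|)).sum = xs.sum + (xs.length : Int) * (-x) := by
        have h1 : xs.map (fun y => |x - y|) = xs.map (fun y => y + (-x)) := by
          apply List.map_congr_left
          intro y hy
          rw [abs_sub_comm, abs_of_nonneg (by have := h.1 y hy; omega)]
          ring
        rw [h1, PySem.List.sum_map_add_int xs (fun y => y) (fun _ => -x),
            PySem.List.sum_map_const_int, List.map_id']
      simp only [pvPair, pvWsum, List.length_cons]
      rw [hS, ih h.2]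
      have hw := pvWsum_succ xs (1 - (xs.length : Int))
      push_cast
      rw [show (1 : Int) - ((xs.length : Int) + 1) + 2 = (1 - (xs.length : Int)) + 1 by ring, hw]
      ring

lemma pvDist_eq (v : List Int) : pvDistA v = pvDistB v := by
  have hp := PySem.List.sorted_perm v (fun x => x) false
  rw [pvDistA_eq_wsum v, ← hp.length_eq,
      ← pvPair_sorted_eq_wsum _ (PySem.List.sorted_pairwise v (fun x => x)),
      pvPair_perm hp, pvDistB_eq_pair]

-- A's "ensure key then append" step is exactly setdefault+append
lemma pvStep_eq (d : PySem.Dict Int (List Int)) (y x : Int) :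
    (if d.get? y = none then d.insert y [] else d).modify y [] (fun l => l ++ [x])
      = d.modify y [] (fun l => l ++ [x]) := by
  by_cases hnone : d.get? y = none
  · rw [if_pos hnone]
    have hfind : d.items.find? (fun p => p.1 == y) = none := by
      simpa [PySem.Dict.get?, Option.map_eq_none_iff] using hnone
    have hmem : ∀ p ∈ d.items, ¬ (p.1 == y) = true := by
      intro p hp
      exact List.find?_eq_none.mp hfind p hp
    have hcont : d.contains y = false := by
      simp only [PySem.Dict.contains, List.any_eq_false]
      intro p hp; exact hmem p hp
    simp only [PySem.Dict.modify, PySem.Dict.insert, PySem.Dict.getD, PySem.Dict.get?, hcont,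
      Bool.false_eq_true, if_false, List.find?_append, hfind, Option.none_or]
    simp only [PySem.Dict.contains, List.any_append]
    simp
    rw [List.map_congr_left (fun p hp => if_neg (by simpa using hmem p hp)), List.map_id']
  · rw [if_neg hnone]

-- the two grouping loops build the same dict
lemma pvGroup_eq (X Y : List Int) :
    (PySem.List.pyRange 0 ((Y.length : Int)) 1).foldl
      (fun (mp : PySem.Dict Int (List Int)) i =>
        (if mp.get? (PySem.List.pyGetD Y i 0) = none
         then mp.insert (PySem.List.pyGetD Y i 0) []
         else mp).modify (PySem.List.pyGetD Y i 0) [] (fun l => l ++ [PySem.List.pyGetD X i 0]))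
      PySem.Dict.empty
    = (PySem.List.enumerate Y 0).foldl
      (fun (d : PySem.Dict Int (List Int)) p => d.modify p.2 [] (fun l => l ++ [PySem.List.pyGetD X p.1 0]))
      PySem.Dict.empty := by
  rw [PySem.List.enumerate_eq_map_pyRange Y 0, List.foldl_map]
  exact PySem.List.foldl_congr_mem' _ _ _ _
    (fun i _ mp => pvStep_eq mp (PySem.List.pyGetD Y i 0) (PySem.List.pyGetD X i 0))

-- ===== VERDICT (by name: the statement is the Claim_ definition above) =====
theorem class_dist_spec : Claim_equal_class_dist := by
  intro X Y _ _
  unfold Spec_class_dist class_dist class_dist_alt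
  rw [pvGroup_eq X Y]
  dsimp only
  rw [PySem.List.foldl_add _ (fun kv : Int × List Int => pvDistA kv.2) 0]
  rw [show (fun kv : Int × List Int => pvDistA kv.2) = (fun kv : Int × List Int => pvDistB kv.2) from
    funext (fun kv => pvDist_eq kv.2)]
  rw [pvDist_eq X]
  simp [PySem.Dict.values, List.map_map, Function.comp_def]
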